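-- pv_equiv track=rewrite | github.com/kseenyoung/programmers | school2/1-4 큰 수 만들기.py | solution
-- ===== SOURCE A (Python) =====
-- def solution(number, k):
--     collection = []
--     for i, n in enumerate(number):
--         while len(collection) > 0 and k > 0 and collection[-1] < n:
--             collection.pop()
--             k -= 1
--         if k == 0:
--             collection += number[i:]
--             break
--         collection.append(n)
--
--     collection = collection[:-k] if k > 0 else collection
--     return ''.join(collection)
-- ===== SOURCE B (Python) =====
-- def solution(number, k):
--     # Pick the digits to KEEP left-to-right: each step take the leftmost
--     # maximum of the feasible window, instead of A's pop-stack on removals.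
--     if k <= 0:
--         return number
--     n = len(number)
--     keep = n - k
--     res = []
--     start = 0
--     for i in range(keep):
--         end = n - (keep - 1 - i)
--         w = number[start:end]
--         best = max(w)
--         start += w.index(best) + 1
--         res.append(best)
--     return ''.join(res)
-- ===== Notes on version B (the rewrite author's own statement) =====
-- stated objective: alternative
-- what changed: A deletes k digits with a greedy pop-stack (push each digit, popping smaller stack tops while removals remain, truncating leftovers); B never builds a stack: it selects the len(number)-k kept digits directly, each step scanning the feasible window for the leftmost maximum and advancing past it.
import Mathlib
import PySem

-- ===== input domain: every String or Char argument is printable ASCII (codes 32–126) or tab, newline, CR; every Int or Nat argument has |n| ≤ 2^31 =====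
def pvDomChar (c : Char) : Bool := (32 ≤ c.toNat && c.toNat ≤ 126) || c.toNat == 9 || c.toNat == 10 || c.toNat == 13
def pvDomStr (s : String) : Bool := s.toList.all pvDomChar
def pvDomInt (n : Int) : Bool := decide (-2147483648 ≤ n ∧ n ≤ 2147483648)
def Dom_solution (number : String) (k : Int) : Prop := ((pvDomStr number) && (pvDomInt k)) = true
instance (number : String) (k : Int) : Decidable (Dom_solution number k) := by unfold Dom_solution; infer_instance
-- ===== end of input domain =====

-- B replaces A's greedy pop-stack over removals by a direct left-to-right selection of the
-- kept digits (leftmost maximum of each feasible window); same return value, alternative algorithm.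

-- ===== PORT A =====
-- the inner `while len(collection) > 0 and k > 0 and collection[-1] < n: collection.pop(); k -= 1`
def popLoopA (coll : List Char) (k : Int) (n : Char) : List Char × Int :=
  if h : coll ≠ [] then
    if 0 < k ∧ coll.getLast h < n then popLoopA coll.dropLast (k - 1) n
    else (coll, k)
  else (coll, k)
termination_by coll.length
decreasing_by
  have : coll.length ≠ 0 := fun h0 => h (List.eq_nil_of_length_eq_zero h0)
  simp [List.length_dropLast]; omega

-- the `for i, n in enumerate(number)` loop; `rest` is number[i:] minus the current char,
-- so `collection += number[i:]` at the break is `p.1 ++ (n :: rest')`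
def loopA (coll : List Char) (k : Int) (rest : List Char) : List Char × Int :=
  match rest with
  | [] => (coll, k)
  | n :: rest' =>
    let p := popLoopA coll k n
    if p.2 == 0 then (p.1 ++ (n :: rest'), p.2)
    else loopA (p.1 ++ [n]) p.2 rest'

def solution (number : String) (k : Int) : String :=
  let p := loopA [] k number.toList
  let coll := if 0 < p.2 then PySem.List.slice p.1 none (some (-p.2)) else p.1
  String.ofList coll

-- ===== PORT B =====
-- the `for i in range(keep)` loop of Source B, with c = keep - i the number of picks left
def pickLoopB (l : List Char) (start : Nat) (c : Nat) (acc : List Char) : List Char :=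
  match c with
  | 0 => acc
  | c' + 1 =>
    let w := PySem.List.slice l (some (start : Int)) (some ((l.length : Int) - (c' : Int)))
    match PySem.List.max? w (fun y => y) with
    | none => acc  -- unreachable (the window is never empty); totalisation only
    | some best =>
      let j := (PySem.List.index? w best).getD 0
      pickLoopB l (start + j + 1) c' (acc ++ [best])

def solution_alt (number : String) (k : Int) : String :=
  if k ≤ 0 then number
  else
    let l := number.toList
    String.ofList (pickLoopB l 0 ((l.length : Int) - k).toNat [])

-- ===== PRECONDITION & SPEC =====
def Spec_solution (number : String) (k : Int) (out : String) : Prop := out = solution_alt number k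
instance (number : String) (k : Int) (out : String) : Decidable (Spec_solution number k out) := by unfold Spec_solution; infer_instance

-- ===== CLAIM (what is proved, stated in full; the proofs are below) =====
def Claim_equal_solution : Prop := ∀ (number : String) (k : Int), Dom_solution number k → Spec_solution number k (solution number k)

-- ===== LEMMAS AND PROOFS =====

-- A's pipeline on the char list (collection[:-k] written as a take)
def runA (l : List Char) (k : Int) : List Char :=
  let p := loopA [] k l
  if 0 < p.2 then p.1.take (p.1.length - p.2.toNat) else p.1

-- common reference recursion: emit the leftmost maximum of the feasible window, recurse past it
def rGreedy (l : List Char) (k : Int) : List Char :=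
  if k ≤ 0 then l
  else if (l.length : Int) ≤ k then []
  else
    match PySem.List.max? (l.take (k.toNat + 1)) (fun y => y) with
    | none => []
    | some m =>
      let i := (PySem.List.index? (l.take (k.toNat + 1)) m).getD 0
      m :: rGreedy (l.drop (i + 1)) (k - i)
termination_by l.length
decreasing_by
  simp only [List.length_drop]
  omega

theorem solution_eq_runA (number : String) (k : Int) :
    solution number k = String.ofList (runA number.toList k) := by
  unfold solution runA
  by_cases h : 0 < (loopA [] k number.toList).2
  · simp only [if_pos h]
    congr 1
    have he : -(loopA [] k number.toList).2
        = -(((loopA [] k number.toList).2.toNat : Int)) := by omega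
    rw [he, PySem.List.slice_to_neg_natCast _ _ (by omega)]
  · simp only [if_neg h]

-- popLoopA facts -------------------------------------------------------------
theorem popA_nonpos (s : List Char) (k : Int) (n : Char) (hk : k ≤ 0) :
    popLoopA s k n = (s, k) := by
  rw [popLoopA]
  split
  · rw [if_neg (by rintro ⟨h1, _⟩; omega)]
  · rfl

theorem popA_all_lt (s : List Char) (k : Int) (n : Char)
    (hall : ∀ c ∈ s, c < n) (hk : (s.length : Int) ≤ k) :
    popLoopA s k n = ([], k - s.length) := by
  induction s using List.reverseRecOn generalizing k with
  | nil => rw [popLoopA]; simp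
  | append_singleton s0 x IH =>
    have hx : x < n := hall x (by simp)
    simp only [List.length_append, List.length_cons, List.length_nil] at hk ⊢
    have hk0 : 0 < k := by push_cast at hk ⊢; omega
    rw [popLoopA, dif_pos (by simp : s0 ++ [x] ≠ [])]
    rw [List.getLast_concat, if_pos ⟨hk0, hx⟩, List.dropLast_concat]
    rw [IH (k - 1) (fun c hc => hall c (List.mem_append_left _ hc)) (by push_cast at hk ⊢; omega)]
    congr 1
    push_cast
    ring

theorem popA_spec (s : List Char) (k : Int) (n : Char) :
    ∃ t : Nat, popLoopA s k n = (s.take (s.length - t), k - t) ∧ t ≤ s.length ∧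
      (0 ≤ k → (t : Int) ≤ k) := by
  induction s using List.reverseRecOn generalizing k with
  | nil => exact ⟨0, by rw [popLoopA]; simp, by simp, by simp⟩
  | append_singleton s0 x IH =>
    rw [popLoopA, dif_pos (by simp : s0 ++ [x] ≠ [])]
    rw [List.getLast_concat]
    by_cases hc : 0 < k ∧ x < n
    · rw [if_pos hc, List.dropLast_concat]
      obtain ⟨t', h1, h2, h3⟩ := IH (k - 1)
      refine ⟨t' + 1, ?_, by simp; omega, fun hk0 => by have := h3 (by omega); omega⟩
      rw [h1]
      have hlen : (s0 ++ [x]).length - (t' + 1) = s0.length - t' := by simp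
      rw [hlen, List.take_append_of_le_length (by omega)]
      congr 1
      push_cast
      ring
    · rw [if_neg hc]
      exact ⟨0, by simp, by simp, by simp⟩

theorem popA_cons (s : List Char) (k : Int) (n m : Char)
    (hk : m < n → k ≤ (s.length : Int)) :
    popLoopA (m :: s) k n = (m :: (popLoopA s k n).1, (popLoopA s k n).2) := by
  induction s using List.reverseRecOn generalizing k with
  | nil =>
    rw [popLoopA, dif_pos (by simp : [m] ≠ [])]
    rw [show ([m] : List Char).getLast (by simp) = m from rfl]
    rw [if_neg (by rintro ⟨h1, h2⟩; have := hk h2; simp at this; omega)]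
    rw [popLoopA]
    simp
  | append_singleton s0 x IH =>
    rw [show m :: (s0 ++ [x]) = (m :: s0) ++ [x] by simp]
    rw [popLoopA, dif_pos (by simp : (m :: s0) ++ [x] ≠ [])]
    rw [List.getLast_concat]
    conv_rhs => rw [popLoopA, dif_pos (by simp : s0 ++ [x] ≠ []), List.getLast_concat]
    by_cases hc : 0 < k ∧ x < n
    · rw [if_pos hc, if_pos hc, List.dropLast_concat, List.dropLast_concat]
      exact IH (k - 1) (fun hmn => by have := hk hmn; simp at this ⊢; omega)
    · rw [if_neg hc, if_neg hc]
      simp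

-- loopA facts ----------------------------------------------------------------
theorem loopA_nonpos (rest s : List Char) (k : Int) (hk : k ≤ 0) :
    loopA s k rest = (s ++ rest, k) := by
  induction rest generalizing s with
  | nil => simp [loopA]
  | cons n rest' IH =>
    simp only [loopA]
    rw [popA_nonpos _ _ _ hk]
    by_cases h0 : k = 0
    · subst h0; simp
    · have : ((s, k).2 == (0 : Int)) = false := by simpa using h0
      rw [this]
      simp only [if_false, Bool.false_eq_true]
      rw [IH (s ++ [n])]
      simp

theorem loopA_cons_bottom (rest : List Char) (s : List Char) (k : Int) (m : Char)
    (H : ∀ (q : Nat) (c : Char), rest[q]? = some c → m < c → k - (s.length : Int) ≤ (q : Int)) :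
    loopA (m :: s) k rest = (m :: (loopA s k rest).1, (loopA s k rest).2) := by
  induction rest generalizing s k with
  | nil => simp [loopA]
  | cons n rest' IH =>
    have h0 := H 0 n (by simp)
    obtain ⟨t, hq, ht, htk⟩ := popA_spec s k n
    simp only [loopA]
    rw [popA_cons s k n m (fun hmn => by have := h0 hmn; omega), hq]
    by_cases hz : k - t = 0
    · simp [hz]
    · have hbeq : ((k - (t : Int)) == (0 : Int)) = false := by simpa using hz
      simp only [hbeq, if_false, Bool.false_eq_true]
      have hlen : ((s.take (s.length - t)).length : Int) = (s.length : Int) - t := by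
        simp [List.length_take]; omega
      rw [show m :: s.take (s.length - t) ++ [n] = m :: (s.take (s.length - t) ++ [n]) by simp]
      exact IH (s.take (s.length - t) ++ [n]) (k - t) (fun q c hqc hmc => by
        have := H (q + 1) c (by simpa using hqc) hmc
        have hl2 : ((s.take (s.length - t) ++ [n]).length : Int) = (s.length : Int) - t + 1 := by
          simp [List.length_take]; omega
        omega)

theorem loopA_nobreak (rest s : List Char) (k : Int)
    (h : 0 < (loopA s k rest).2) :
    (loopA s k rest).2 - ((loopA s k rest).1.length : Int)
      = k - (s.length : Int) - (rest.length : Int) := by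
  induction rest generalizing s k with
  | nil => simp [loopA]
  | cons n rest' IH =>
    obtain ⟨t, hq, ht, htk⟩ := popA_spec s k n
    simp only [loopA, hq] at h ⊢
    by_cases hz : k - t = 0
    · simp [hz] at h
    · have hbeq : ((k - (t : Int)) == (0 : Int)) = false := by simpa using hz
      simp only [hbeq, if_false, Bool.false_eq_true] at h ⊢
      have := IH (s.take (s.length - t) ++ [n]) (k - t) h
      have hl2 : ((s.take (s.length - t) ++ [n]).length : Int) = (s.length : Int) - t + 1 := by
        simp [List.length_take]; omega
      simp only [List.length_cons] at ⊢
      push_cast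
      omega

theorem loopA_big (rest s : List Char) (k : Int) (hk : 0 < k)
    (h : ((s.length : Int) + (rest.length : Int)) ≤ k) :
    0 < (loopA s k rest).2 := by
  induction rest generalizing s k with
  | nil => simpa [loopA] using hk
  | cons n rest' IH =>
    obtain ⟨t, hq, ht, htk⟩ := popA_spec s k n
    simp only [List.length_cons] at h
    have hk1 : 0 < k - t := by push_cast at h; omega
    have hbeq : ((k - (t : Int)) == (0 : Int)) = false := by simpa using (by omega : ¬(k - t = 0))
    simp only [loopA, hq, hbeq, if_false, Bool.false_eq_true]
    refine IH (s.take (s.length - t) ++ [n]) (k - t) hk1 ?_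
    have hl2 : ((s.take (s.length - t) ++ [n]).length : Int) = (s.length : Int) - t + 1 := by
      simp [List.length_take]; omega
    push_cast at h ⊢
    omega

theorem loopA_phase1 (p : List Char) (rest s : List Char) (k : Int) (m : Char)
    (hp : ∀ c ∈ p, c < m) (hs : ∀ c ∈ s, c < m)
    (hk : ((s.length : Int) + (p.length : Int)) ≤ k) (hk0 : 0 < k) :
    loopA s k (p ++ m :: rest)
      = if k = (s.length : Int) + (p.length : Int) then ((m :: rest : List Char), (0 : Int))
        else loopA [m] (k - (s.length : Int) - (p.length : Int)) rest := by
  induction p generalizing s k with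
  | nil =>
    simp only [List.nil_append, loopA, List.length_nil]
    rw [popA_all_lt s k m hs (by simpa using hk)]
    by_cases hz : k - s.length = 0
    · have hbeq : ((k - (s.length : Int)) == (0 : Int)) = true := by simpa using hz
      simp only [hbeq, if_true]
      rw [if_pos (by push_cast; omega)]
      simp [hz]
    · have hbeq : ((k - (s.length : Int)) == (0 : Int)) = false := by simpa using hz
      simp only [hbeq, if_false, Bool.false_eq_true]
      rw [if_neg (by push_cast; omega)]
      simp
  | cons a p' IH =>
    simp only [List.cons_append, loopA]
    obtain ⟨t, hq, ht, htk⟩ := popA_spec s k a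
    rw [hq]
    have hk' : (s.length : Int) + (p'.length : Int) + 1 ≤ k := by
      simp only [List.length_cons] at hk; push_cast at hk ⊢; omega
    have hk1 : 0 < k - t := by have := htk (le_of_lt hk0); omega
    have hbeq : ((k - (t : Int)) == (0 : Int)) = false := by simpa using (by omega : ¬(k - t = 0))
    simp only [hbeq, if_false, Bool.false_eq_true]
    have hs1 : ∀ c ∈ s.take (s.length - t) ++ [a], c < m := by
      intro c hc
      rcases List.mem_append.1 hc with h' | h'
      · exact hs c (List.mem_of_mem_take h')
      · simp at h'; exact h' ▸ hp a (by simp)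
    have hl2 : ((s.take (s.length - t) ++ [a]).length : Int) = (s.length : Int) - t + 1 := by
      simp [List.length_take]; omega
    rw [IH (s.take (s.length - t) ++ [a]) (k - t) (fun c hc => hp c (List.mem_cons_of_mem a hc)) hs1
      (by rw [hl2]; omega) hk1]
    rw [show k - t - ((s.take (s.length - t) ++ [a]).length : Int) - (p'.length : Int)
            = k - (s.length : Int) - ((a :: p').length : Int) by
          rw [hl2]; simp only [List.length_cons]; push_cast; ring]
    have hcond : (k - (t : Int) = (s.length : Int) - t + 1 + (p'.length : Int))
        ↔ (k = (s.length : Int) + ((a :: p').length : Int)) := by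
      simp only [List.length_cons]; push_cast; omega
    simp only [hl2, hcond]

-- runA decomposition and characterisation ------------------------------------
theorem runA_big (l : List Char) (k : Int) (hk : 0 < k) (h : (l.length : Int) ≤ k) :
    runA l k = [] := by
  have h2 : 0 < (loopA [] k l).2 := loopA_big l [] k hk (by simpa using h)
  have h5 := loopA_nobreak l [] k h2
  unfold runA
  rw [if_pos h2]
  have hz : (loopA [] k l).1.length - (loopA [] k l).2.toNat = 0 := by
    simp only [List.length_nil] at h5; omega
  simp [hz]

theorem runA_nonpos (l : List Char) (k : Int) (hk : k ≤ 0) : runA l k = l := by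
  unfold runA
  rw [loopA_nonpos l [] k hk, if_neg (by simp; omega)]
  simp

theorem runA_decomp (l : List Char) (k : Int) (m : Char) (i : Nat)
    (hk0 : 0 < k) (hkl : k < (l.length : Int))
    (hm : PySem.List.max? (l.take (k.toNat + 1)) (fun y => y) = some m)
    (hi : (PySem.List.index? (l.take (k.toNat + 1)) m).getD 0 = i) :
    runA l k = m :: runA (l.drop (i + 1)) (k - i) := by
  have hwlen : (l.take (k.toNat + 1)).length = k.toNat + 1 := by
    simp [List.length_take]; omega
  have hmem : m ∈ l.take (k.toNat + 1) := PySem.List.max?_mem hm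
  have hidx : PySem.List.index? (l.take (k.toNat + 1)) m = some i := by
    have hsome := (PySem.List.index?_isSome_iff _ m).2 hmem
    obtain ⟨j, hj⟩ := Option.isSome_iff_exists.1 hsome
    rw [hj] at hi
    simp only [Option.getD_some] at hi
    exact hi ▸ hj
  obtain ⟨hilt, hwi, hbefore⟩ := PySem.List.getElem_of_index?_eq_some hidx
  have hle : ∀ c ∈ l.take (k.toNat + 1), c ≤ m := fun y hy => PySem.List.max?_isMax hm y hy
  have hik : (i : Int) ≤ k := by rw [hwlen] at hilt; omega
  have hil : i < l.length := by rw [hwlen] at hilt; omega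
  have hli : l[i] = m := by
    rw [← List.getElem_take (j := k.toNat + 1) (h := by rw [hwlen]; omega)]
    exact hwi
  have hdecomp : l = l.take i ++ m :: l.drop (i + 1) := by
    conv_lhs => rw [← List.take_append_drop i l]
    rw [List.drop_eq_getElem_cons hil, hli]
  have hp : ∀ c ∈ l.take i, c < m := by
    intro c hc
    obtain ⟨j, hjlen, hval⟩ := List.mem_iff_getElem.1 hc
    have hji : j < i := by simp [List.length_take] at hjlen; omega
    have hjl : j < l.length := by omega
    have hcj : c = l[j] := by rw [← hval]; exact List.getElem_take
    have hcw : c = (l.take (k.toNat + 1))[j]'(by rw [hwlen]; omega) := by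
      rw [hcj]; exact (List.getElem_take (h := by rw [hwlen]; omega) (j := k.toNat + 1)).symm
    have hcle : c ≤ m := hle c (by rw [hcw]; exact List.getElem_mem _)
    have hcne : c ≠ m := by rw [hcw]; exact hbefore j hji
    exact lt_of_le_of_ne hcle hcne
  have hplen : (l.take i).length = i := by simp [List.length_take]; omega
  have hmain := loopA_phase1 (l.take i) (l.drop (i + 1)) [] k m hp (by simp)
    (by simp [hplen]; omega) hk0
  rw [← hdecomp] at hmain
  simp only [List.length_nil, hplen] at hmain
  by_cases hcase : k = (i : Int)
  · have hl0 : loopA [] k l = (m :: l.drop (i + 1), 0) := by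
      rw [hmain, if_pos (by push_cast; omega)]
    unfold runA
    rw [hl0]
    norm_num
    rw [show k - (i : Int) = 0 by omega, loopA_nonpos (List.drop (i + 1) l) [] 0 le_rfl]
    simp
  · have hb0 : 0 < k - (i : Int) := by omega
    have hH : ∀ (q : Nat) (c : Char), (l.drop (i + 1))[q]? = some c → m < c →
        (k - (i : Int)) - (([] : List Char).length : Int) ≤ (q : Int) := by
      intro q c hqc hmc
      rw [List.getElem?_drop] at hqc
      have hqlt : i + 1 + q < l.length := (List.getElem?_eq_some_iff.1 hqc).1
      have hqv : l[i + 1 + q]'hqlt = c := (List.getElem?_eq_some_iff.1 hqc).2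
      by_cases hwin : i + 1 + q < k.toNat + 1
      · exfalso
        have hcw : c = (l.take (k.toNat + 1))[i + 1 + q]'(by rw [hwlen]; omega) := by
          rw [← hqv]; exact (List.getElem_take (h := by rw [hwlen]; omega) (j := k.toNat + 1)).symm
        have := hle c (by rw [hcw]; exact List.getElem_mem _)
        exact absurd hmc (not_lt.2 this)
      · simp only [List.length_nil, Nat.cast_zero]
        omega
    have hcons := loopA_cons_bottom (l.drop (i + 1)) [] (k - i) m hH
    have hlA : loopA [] k l = loopA [m] (k - i) (l.drop (i + 1)) := by
      rw [hmain, if_neg (by push_cast; omega)]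
      norm_num
    unfold runA
    rw [hlA, hcons]
    by_cases h2 : 0 < (loopA [] (k - (i : Int)) (l.drop (i + 1))).2
    · rw [if_pos h2, if_pos h2]
      have h5 := loopA_nobreak (l.drop (i + 1)) [] (k - i) h2
      have hdl : ((l.drop (i + 1)).length : Int) = (l.length : Int) - (i + 1) := by
        simp [List.length_drop]; omega
      have hF : (loopA [] (k - (i : Int)) (l.drop (i + 1))).2.toNat
          ≤ (loopA [] (k - (i : Int)) (l.drop (i + 1))).1.length := by
        simp only [List.length_nil] at h5; omega
      simp only [List.length_cons]
      rw [show (loopA [] (k - (i : Int)) (l.drop (i + 1))).1.length + 1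
            - (loopA [] (k - (i : Int)) (l.drop (i + 1))).2.toNat
          = ((loopA [] (k - (i : Int)) (l.drop (i + 1))).1.length
            - (loopA [] (k - (i : Int)) (l.drop (i + 1))).2.toNat) + 1 by omega]
      rw [List.take_succ_cons]
    · rw [if_neg h2, if_neg h2]



theorem rGreedy_step (r : List Char) (kl : Int) (m : Char) (i : Nat)
    (h0 : 0 ≤ kl) (h1 : kl < (r.length : Int))
    (hm : PySem.List.max? (r.take (kl.toNat + 1)) (fun y => y) = some m)
    (hi : (PySem.List.index? (r.take (kl.toNat + 1)) m).getD 0 = i) :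
    rGreedy r kl = m :: rGreedy (r.drop (i + 1)) (kl - i) := by
  by_cases hz : kl ≤ 0
  · have hkl0 : kl = 0 := le_antisymm hz h0
    subst hkl0
    cases r with
    | nil => simp at h1
    | cons r0 r' =>
      have hw : (r0 :: r').take ((0 : Int).toNat + 1) = [r0] := by simp
      rw [hw] at hm hi
      rw [PySem.List.max?_id_cons] at hm
      simp only [List.foldl_nil, Option.some.injEq] at hm
      subst hm
      rw [PySem.List.index?_cons_self] at hi
      simp only [Option.getD_some] at hi
      subst hi
      rw [rGreedy, if_pos le_rfl, rGreedy]
      norm_num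
  · have hkl : 0 < kl := by omega
    conv_lhs => rw [rGreedy]
    rw [if_neg hz, if_neg (by omega)]
    simp only [hm]
    rw [hi]

theorem runA_eq_rGreedy (l : List Char) (k : Int) : runA l k = rGreedy l k := by
  suffices H : ∀ (N : Nat) (l : List Char) (k : Int), l.length ≤ N → runA l k = rGreedy l k from
    H l.length l k le_rfl
  intro N
  induction N with
  | zero =>
    intro l k h
    have hl : l = [] := List.eq_nil_of_length_eq_zero (by omega)
    subst hl
    by_cases h1 : k ≤ 0
    · rw [runA_nonpos _ _ h1, rGreedy, if_pos h1]
    · rw [runA_big _ _ (by omega) (by simp; omega), rGreedy, if_neg h1, if_pos (by simp; omega)]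
  | succ N IH =>
    intro l k h
    by_cases h1 : k ≤ 0
    · rw [runA_nonpos _ _ h1, rGreedy, if_pos h1]
    · by_cases h2 : (l.length : Int) ≤ k
      · rw [runA_big _ _ (by omega) h2, rGreedy, if_neg h1, if_pos h2]
      · have hk0 : 0 < k := by omega
        have hwne : l.take (k.toNat + 1) ≠ [] := by
          have hlen : (l.take (k.toNat + 1)).length = k.toNat + 1 := by
            simp [List.length_take]; omega
          intro hn; rw [hn] at hlen; simp at hlen
        obtain ⟨m, hm⟩ : ∃ m, PySem.List.max? (l.take (k.toNat + 1)) (fun y => y) = some m := by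
          cases hmx : PySem.List.max? (l.take (k.toNat + 1)) (fun y => y) with
          | none => exact absurd ((PySem.List.max?_eq_none_iff _ _).1 hmx) hwne
          | some m => exact ⟨m, rfl⟩
        rw [runA_decomp l k m ((PySem.List.index? (l.take (k.toNat + 1)) m).getD 0) hk0
          (by omega) hm rfl]
        rw [rGreedy_step l k m ((PySem.List.index? (l.take (k.toNat + 1)) m).getD 0)
          (by omega) (by omega) hm rfl]
        congr 1
        exact IH _ _ (by simp [List.length_drop]; omega)

-- B equals the reference recursion -------------------------------------------

theorem pickLoopB_eq (l : List Char) (c start : Nat) (acc : List Char)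
    (h : start + c ≤ l.length) :
    pickLoopB l start c acc
      = acc ++ rGreedy (l.drop start) ((l.length : Int) - (start : Int) - (c : Int)) := by
  induction c generalizing start acc with
  | zero =>
    simp only [pickLoopB, Nat.cast_zero, sub_zero]
    by_cases hz : (l.length : Int) - start ≤ 0
    · rw [rGreedy, if_pos hz, List.drop_eq_nil_of_le (by omega)]
      simp
    · rw [rGreedy, if_neg hz, if_pos (by simp [List.length_drop]; omega)]
      simp
  | succ c' IHc =>
    simp only [pickLoopB]
    have hslice : PySem.List.slice l (some (start : Int)) (some ((l.length : Int) - (c' : Int)))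
        = (l.drop start).take ((((l.length : Int) - start - ((c' : Int) + 1)).toNat) + 1) := by
      rw [PySem.List.slice_toNat l (by positivity) (by omega)]
      rw [Int.toNat_natCast]
      congr 1
      omega
    rw [hslice]
    have hkl0 : (0 : Int) ≤ (l.length : Int) - start - ((c' : Int) + 1) := by omega
    have hklr : (l.length : Int) - start - ((c' : Int) + 1) < ((l.drop start).length : Int) := by
      simp [List.length_drop]; omega
    have hlen2 : ((l.drop start).take ((((l.length : Int) - start - ((c' : Int) + 1)).toNat) + 1)).length
        = (((l.length : Int) - start - ((c' : Int) + 1)).toNat) + 1 := by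
      simp [List.length_take, List.length_drop]; omega
    have hrne : (l.drop start).take ((((l.length : Int) - start - ((c' : Int) + 1)).toNat) + 1) ≠ [] := by
      intro hn; rw [hn] at hlen2; simp at hlen2
    obtain ⟨m, hm⟩ : ∃ m, PySem.List.max?
        ((l.drop start).take ((((l.length : Int) - start - ((c' : Int) + 1)).toNat) + 1))
        (fun y => y) = some m := by
      cases hmx : PySem.List.max?
          ((l.drop start).take ((((l.length : Int) - start - ((c' : Int) + 1)).toNat) + 1))
          (fun y => y) with
      | none => exact absurd ((PySem.List.max?_eq_none_iff _ _).1 hmx) hrne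
      | some m => exact ⟨m, rfl⟩
    simp only [hm]
    set J := (PySem.List.index?
        ((l.drop start).take ((((l.length : Int) - start - ((c' : Int) + 1)).toNat) + 1)) m).getD 0
      with hJ
    have hmem := PySem.List.max?_mem hm
    have hidx : PySem.List.index?
        ((l.drop start).take ((((l.length : Int) - start - ((c' : Int) + 1)).toNat) + 1)) m
        = some J := by
      have hsome := (PySem.List.index?_isSome_iff _ m).2 hmem
      obtain ⟨j, hj⟩ := Option.isSome_iff_exists.1 hsome
      rw [hj, hJ, hj]
      simp
    obtain ⟨hjlt, -, -⟩ := PySem.List.getElem_of_index?_eq_some hidx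
    rw [hlen2] at hjlt
    have hjb : J ≤ (((l.length : Int) - start - ((c' : Int) + 1)).toNat) := by omega
    rw [IHc (start + J + 1) (acc ++ [m]) (by omega)]
    rw [show ((c' + 1 : Nat) : Int) = ((c' : Nat) : Int) + 1 from by push_cast; ring]
    rw [rGreedy_step (l.drop start) ((l.length : Int) - start - ((c' : Int) + 1)) m J
      hkl0 hklr hm hJ.symm]
    rw [List.drop_drop]
    rw [show (l.length : Int) - ((start + J + 1 : Nat) : Int) - ((c' : Nat) : Int)
        = (l.length : Int) - (start : Int) - ((c' : Int) + 1) - (J : Int) by push_cast; ring]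
    rw [show start + (J + 1) = start + J + 1 by omega]
    simp

theorem solution_alt_eq (number : String) (k : Int) :
    solution_alt number k = String.ofList (rGreedy number.toList k) := by
  by_cases h1 : k ≤ 0
  · unfold solution_alt
    rw [if_pos h1, rGreedy, if_pos h1, String.ofList_toList]
  · unfold solution_alt
    rw [if_neg h1]
    show String.ofList (pickLoopB number.toList 0 (((number.toList.length : Int) - k).toNat) [])
        = String.ofList (rGreedy number.toList k)
    by_cases h2 : (number.toList.length : Int) ≤ k
    · rw [show ((number.toList.length : Int) - k).toNat = 0 by omega]
      simp only [pickLoopB]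
      rw [rGreedy, if_neg h1, if_pos h2]
    · rw [pickLoopB_eq number.toList (((number.toList.length : Int) - k).toNat) 0 [] (by omega)]
      rw [show (number.toList.length : Int) - (0 : Nat) - ((((number.toList.length : Int) - k).toNat : Nat) : Int) = k by omega]
      simp

-- ===== VERDICT (by name: the statement is the Claim_ definition above) =====
theorem solution_spec : Claim_equal_solution := by
  intro number k _
  unfold Spec_solution
  rw [solution_eq_runA, runA_eq_rGreedy, solution_alt_eq]
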